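-- pv_equiv track=rewrite | github.com/TRA3H/hunter | backend/app/services/autofill.py | has_captcha
-- ===== SOURCE A (Python) =====
-- def has_captcha(page_content: str) -> bool:
--     """Simple heuristic to detect CAPTCHA presence on the page."""
--     captcha_indicators = [
--         "captcha",
--         "recaptcha",
--         "hcaptcha",
--         "g-recaptcha",
--         "h-captcha",
--         "challenge-form",
--         "cf-turnstile",
--         "arkose",
--     ]
--     content_lower = page_content.lower()
--     return any(indicator in content_lower for indicator in captcha_indicators)
-- ===== SOURCE B (Python) =====
-- def has_captcha(page_content: str) -> bool:
--     """Simple heuristic to detect CAPTCHA presence on the page."""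
--     # Minimal needle set: every other indicator in A's list contains one of these,
--     # so one left-to-right scan checking prefixes at each position suffices.
--     needles = ("captcha", "challenge-form", "cf-turnstile", "arkose")
--     text = page_content.lower()
--     for i in range(len(text)):
--         for n in needles:
--             if text.startswith(n, i):
--                 return True
--     return False
-- ===== Notes on version B (the rewrite author's own statement) =====
-- stated objective: alternative
-- what changed: Replaces eight independent substring searches with a single left-to-right scan that tests a reduced set of four minimal needles (the other four indicators all contain 'captcha') as prefixes at each position.
import Mathlib
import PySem

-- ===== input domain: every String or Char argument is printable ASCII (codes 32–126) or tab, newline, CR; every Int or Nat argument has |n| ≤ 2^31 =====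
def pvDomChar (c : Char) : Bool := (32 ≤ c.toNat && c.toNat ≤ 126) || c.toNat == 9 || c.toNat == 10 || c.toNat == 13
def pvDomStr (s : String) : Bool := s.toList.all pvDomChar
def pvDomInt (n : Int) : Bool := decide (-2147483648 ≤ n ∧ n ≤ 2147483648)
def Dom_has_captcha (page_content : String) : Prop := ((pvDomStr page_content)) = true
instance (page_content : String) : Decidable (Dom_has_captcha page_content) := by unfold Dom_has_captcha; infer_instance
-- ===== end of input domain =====

-- B replaces the eight independent substring searches by a single left-to-right scan testing four minimal needles as prefixes at each position (objective: alternative, same result, not faster).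
-- ===== PORT A =====
def has_captcha (page_content : String) : Bool :=
  let captcha_indicators : List String :=
    ["captcha", "recaptcha", "hcaptcha", "g-recaptcha",
     "h-captcha", "challenge-form", "cf-turnstile", "arkose"]
  let content_lower := PySem.Str.lower page_content
  captcha_indicators.any (fun indicator => PySem.Str.isIn indicator content_lower)

-- ===== PORT B =====
def hcNeedles : List (List Char) :=
  ["captcha".toList, "challenge-form".toList, "cf-turnstile".toList, "arkose".toList]

-- the scan of Source B: at each position, test each needle as a prefix
def hcScan : List Char → Bool
  | [] => false
  | c :: rest =>
    if hcNeedles.any (fun n => n.isPrefixOf (c :: rest)) then true else hcScan rest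

def has_captcha_alt (page_content : String) : Bool :=
  hcScan (PySem.Chars.lower page_content.toList)

-- ===== PRECONDITION & SPEC =====
def Spec_has_captcha (page_content : String) (out : Bool) : Prop := out = has_captcha_alt page_content
instance (page_content : String) (out : Bool) : Decidable (Spec_has_captcha page_content out) := by unfold Spec_has_captcha; infer_instance

-- ===== CLAIM (what is proved, stated in full; the proofs are below) =====
def Claim_equal_has_captcha : Prop := ∀ (page_content : String), Dom_has_captcha page_content → Spec_has_captcha page_content (has_captcha page_content)

-- ===== LEMMAS AND PROOFS =====

lemma isIn_cons (n : List Char) (c : Char) (t : List Char) :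
    PySem.Chars.isIn n (c :: t) = (n.isPrefixOf (c :: t) || PySem.Chars.isIn n t) := by
  rw [Bool.eq_iff_iff]
  simp [PySem.Chars.isIn_iff_infix, List.infix_cons_iff, List.isPrefixOf_iff_prefix]

lemma isIn_nil_of_ne (n : List Char) (h : n ≠ []) : PySem.Chars.isIn n [] = false := by
  rw [← Bool.not_eq_true, PySem.Chars.isIn_iff_infix]
  simpa using h

lemma hcScan_eq (t : List Char) :
    hcScan t = (PySem.Chars.isIn "captcha".toList t
      || PySem.Chars.isIn "challenge-form".toList t
      || PySem.Chars.isIn "cf-turnstile".toList t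
      || PySem.Chars.isIn "arkose".toList t) := by
  induction t with
  | nil => simp [hcScan, isIn_nil_of_ne]
  | cons c rest ih =>
    rw [Bool.eq_iff_iff]
    simp only [hcScan, hcNeedles, List.any_cons, List.any_nil, isIn_cons, ih,
      Bool.or_eq_true, Bool.or_false, List.isPrefixOf_iff_prefix]
    split_ifs with h
    · simp only [true_iff]
      rcases h with h | h | h | h
      · exact Or.inl (Or.inl (Or.inl (Or.inl h)))
      · exact Or.inl (Or.inl (Or.inr (Or.inl h)))
      · exact Or.inl (Or.inr (Or.inl h))
      · exact Or.inr (Or.inl h)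
    · push Not at h
      obtain ⟨h1, h2, h3, h4⟩ := h
      simp only [Bool.or_eq_true]
      tauto


-- ===== VERDICT (by name: the statement is the Claim_ definition above) =====
theorem has_captcha_spec : Claim_equal_has_captcha := by
  intro s _
  unfold Spec_has_captcha has_captcha has_captcha_alt
  simp only [List.any_cons, List.any_nil, Bool.or_false]
  rw [hcScan_eq, Bool.eq_iff_iff]
  simp only [PySem.Str.isIn_iff_infix, PySem.Chars.isIn_iff_infix, PySem.Str.toList_lower,
    Bool.or_eq_true]
  have t1 : "captcha".toList <:+: "recaptcha".toList := by decide
  have t2 : "captcha".toList <:+: "hcaptcha".toList := by decide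
  have t3 : "captcha".toList <:+: "g-recaptcha".toList := by decide
  have t4 : "captcha".toList <:+: "h-captcha".toList := by decide
  constructor
  · rintro (h | h | h | h | h | h | h | h)
    exacts [Or.inl (Or.inl (Or.inl h)), Or.inl (Or.inl (Or.inl (t1.trans h))),
      Or.inl (Or.inl (Or.inl (t2.trans h))), Or.inl (Or.inl (Or.inl (t3.trans h))),
      Or.inl (Or.inl (Or.inl (t4.trans h))), Or.inl (Or.inl (Or.inr h)),
      Or.inl (Or.inr h), Or.inr h]
  · rintro (((h | h) | h) | h)
    exacts [Or.inl h, Or.inr (Or.inr (Or.inr (Or.inr (Or.inr (Or.inl h))))),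
      Or.inr (Or.inr (Or.inr (Or.inr (Or.inr (Or.inr (Or.inl h)))))),
      Or.inr (Or.inr (Or.inr (Or.inr (Or.inr (Or.inr (Or.inr h))))))]
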